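-- pv_equiv track=rewrite | github.com/neozeno/programacion-en-python-uniandes | 01-programacion-en-python/M3/retos/producto_mas_barato.py | producto_mas_barato
-- ===== SOURCE A (Python) =====
-- def producto_mas_barato(catalogo: dict[str, int]) -> str | None:
--     if len(catalogo) == 0:
--         return "No hay productos para escoger"
--
--     precio_menor: int = min(catalogo.values())
--
--     if precio_menor > 10_000:
--         return None
--
--     candidatos: list[str] = [
--         producto for producto, precio in catalogo.items() if precio == precio_menor
--     ]
--
--     return min(candidatos, key=lambda nombre: nombre.lower())
-- ===== SOURCE B (Python) =====
-- def producto_mas_barato(catalogo: dict[str, int]) -> str | None: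
--     if len(catalogo) == 0:
--         return "No hay productos para escoger"
--
--     mejor_nombre: str | None = None
--     precio_menor: int | None = None
--     for nombre, precio in catalogo.items():
--         if precio_menor is None or precio < precio_menor:
--             precio_menor = precio
--             mejor_nombre = nombre
--         elif precio == precio_menor and nombre.lower() < mejor_nombre.lower():
--             mejor_nombre = nombre
--
--     if precio_menor > 10_000:
--         return None
--     return mejor_nombre
-- ===== Notes on version B (the rewrite author's own statement) =====
-- stated objective: alternative
-- what changed: Replaces A's three passes (min over values, filter of the tied candidates, min over the candidate list by lowercased name) with one fused loop over the items maintaining the running minimum price and the tie-broken best name (strict lowercase comparison keeps min's first-wins semantics).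
import Mathlib
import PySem

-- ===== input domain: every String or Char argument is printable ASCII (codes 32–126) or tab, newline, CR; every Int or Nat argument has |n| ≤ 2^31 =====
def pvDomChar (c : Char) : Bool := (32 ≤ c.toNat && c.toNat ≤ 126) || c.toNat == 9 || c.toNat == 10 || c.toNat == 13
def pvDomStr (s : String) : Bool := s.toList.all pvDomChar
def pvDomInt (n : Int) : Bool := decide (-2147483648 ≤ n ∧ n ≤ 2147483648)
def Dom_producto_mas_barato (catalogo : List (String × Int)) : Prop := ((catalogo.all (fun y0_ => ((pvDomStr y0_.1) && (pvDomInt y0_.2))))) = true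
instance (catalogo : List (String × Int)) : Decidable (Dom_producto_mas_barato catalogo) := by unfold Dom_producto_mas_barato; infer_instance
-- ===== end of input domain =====

-- B replaces A's three passes (min over the values, filter of the tied candidates, min over the
-- candidates by lowercased name) with one fused loop maintaining the running minimum price and
-- the tie-broken best name; same result, no intermediate list (objective: alternative).

-- ===== PORT A =====
-- The dict argument is represented as its insertion-ordered association list; PySem.Dict.ofList
-- reproduces Python's dict construction (duplicate keys overwrite in place).
def producto_mas_barato (catalogo : List (String × Int)) : Option String :=
  let d := PySem.Dict.ofList catalogo
  if d.size = 0 then some "No hay productos para escoger"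
  else
    match PySem.List.min? d.values (fun v => v) with  -- min(catalogo.values()); nonempty here, never none
    | none => none
    | some precio_menor =>
      if precio_menor > 10000 then none
      else
        let candidatos : List String :=
          (d.items.filter (fun p => p.2 == precio_menor)).map (fun p => p.1)
        PySem.List.min? candidatos (fun nombre => PySem.Str.lower nombre)
          -- min(candidatos, key=…lower): candidatos is nonempty here, so this is 'some'

-- ===== PORT B =====
-- loop body of Source B: state = none before the first item, then some (mejor_nombre, precio_menor)
def pmbStep (acc : Option (String × Int)) (p : String × Int) : Option (String × Int) :=
  match acc with
  | none => some p
  | some (bn, bp) =>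
    if p.2 < bp then some p
    else if p.2 == bp && decide (PySem.Str.lower p.1 < PySem.Str.lower bn) then some (p.1, bp)
    else some (bn, bp)

def producto_mas_barato_alt (catalogo : List (String × Int)) : Option String :=
  let d := PySem.Dict.ofList catalogo
  if d.size = 0 then some "No hay productos para escoger"
  else
    match d.items.foldl pmbStep none with
    | none => none  -- unreachable: items nonempty
    | some (bn, bp) => if bp > 10000 then none else some bn

-- ===== PRECONDITION & SPEC =====
def Spec_producto_mas_barato (catalogo : List (String × Int)) (out : Option String) : Prop := out = producto_mas_barato_alt catalogo
instance (catalogo : List (String × Int)) (out : Option String) : Decidable (Spec_producto_mas_barato catalogo out) := by unfold Spec_producto_mas_barato; infer_instance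

-- ===== CLAIM (what is proved, stated in full; the proofs are below) =====
def Claim_equal_producto_mas_barato : Prop := ∀ (catalogo : List (String × Int)), Dom_producto_mas_barato catalogo → Spec_producto_mas_barato catalogo (producto_mas_barato catalogo)

-- ===== LEMMAS AND PROOFS =====

theorem foldl_min_le (r : List Int) : ∀ (a : Int), r.foldl min a ≤ a := by
  induction r with
  | nil => intro a; simp
  | cons b r ih =>
      intro a
      calc r.foldl min (min a b) ≤ min a b := ih (min a b)
        _ ≤ a := min_le_left a b

-- min with a key, folded one step: the first two elements collapse to their first-wins minimum
theorem min?_cons_cons {α κ : Type} [LinearOrder κ] (a b : α) (r : List α) (key : α → κ) :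
    PySem.List.min? (a :: b :: r) key
      = PySem.List.min? ((if key b < key a then b else a) :: r) key := by
  simp only [PySem.List.min?, List.foldl_cons]
  split <;> rfl

-- the heart: B's fused fold computes (best tie-broken name, minimum price) of x :: l
theorem pmb_fold (l : List (String × Int)) (x : String × Int) :
    l.foldl pmbStep (some x)
      = (PySem.List.min?
            (((x :: l).filter
                (fun p => p.2 == (l.map (fun q => q.2)).foldl min x.2)).map (fun p => p.1))
            (fun n => PySem.Str.lower n)).map
          (fun n => (n, (l.map (fun q => q.2)).foldl min x.2)) := by
  induction l generalizing x with
  | nil =>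
      simp [PySem.List.min?]
  | cons y t ih =>
      rcases x with ⟨xn, xp⟩; rcases y with ⟨yn, yp⟩
      have hM : ((((yn, yp) :: t)).map (fun q => q.2)).foldl min xp
          = (t.map (fun q => q.2)).foldl min (min xp yp) := by
        simp
      have hle : (t.map (fun q => q.2)).foldl min (min xp yp) ≤ min xp yp :=
        foldl_min_le _ _
      have hz : List.foldl pmbStep (some (xn, xp)) ((yn, yp) :: t)
          = List.foldl pmbStep (pmbStep (some (xn, xp)) (yn, yp)) t := rfl
      rw [hz, hM]
      by_cases h1 : yp < xp
      · -- strictly cheaper: state becomes (yn, yp); (xn, xp) is never a candidate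
        have hs : pmbStep (some (xn, xp)) (yn, yp) = some (yn, yp) := by
          simp [pmbStep, h1]
        rw [hs, ih]
        have hmm : min xp yp = yp := by omega
        rw [hmm] at hle ⊢
        have hx : ¬ ((xp == (t.map (fun q => q.2)).foldl min yp) = true) := by
          simp only [beq_iff_eq]; omega
        simp only [List.filter_cons, if_neg hx]
      · by_cases h2 : yp = xp ∧ PySem.Str.lower yn < PySem.Str.lower xn
        · -- tie with smaller lowercase name: state becomes (yn, xp)
          have hs : pmbStep (some (xn, xp)) (yn, yp) = some (yn, xp) := by
            simp [pmbStep, h2.1, h2.2]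
          have hmm : min xp yp = xp := by omega
          rw [hs, ih, hmm] at *
          by_cases hxM : xp = (t.map (fun q => q.2)).foldl min xp
          · have hyM : yp = (t.map (fun q => q.2)).foldl min xp := h2.1.trans hxM
            simp only [List.filter_cons, beq_iff_eq, if_pos (hxM), if_pos hyM, List.map_cons]
            rw [min?_cons_cons, if_pos h2.2]
          · have hyM : ¬ ((yp == (t.map (fun q => q.2)).foldl min xp) = true) := by
              simp only [beq_iff_eq]; rw [h2.1]; exact hxM
            have hxM' : ¬ ((xp == (t.map (fun q => q.2)).foldl min xp) = true) := by
              simp only [beq_iff_eq]; exact hxM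
            simp only [List.filter_cons, if_neg hxM', if_neg hyM]
        · -- state stays (xn, xp)
          have hs : pmbStep (some (xn, xp)) (yn, yp) = some (xn, xp) := by
            rcases Decidable.em (yp = xp) with he | he
            · have hl : ¬ (PySem.Str.lower yn < PySem.Str.lower xn) := fun hl => h2 ⟨he, hl⟩
              simp [pmbStep, he, hl]
            · have : ¬ ((yp == xp) = true) := by simp [he]
              simp [pmbStep, h1, this]
          have hmm : min xp yp = xp := by omega
          rw [hs, ih, hmm] at *
          rcases Decidable.em (yp = xp) with he | he
          · have hl : ¬ (PySem.Str.lower yn < PySem.Str.lower xn) := fun hl => h2 ⟨he, hl⟩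
            by_cases hxM : xp = (t.map (fun q => q.2)).foldl min xp
            · have hyM : yp = (t.map (fun q => q.2)).foldl min xp := he.trans hxM
              simp only [List.filter_cons, beq_iff_eq, if_pos hxM, if_pos hyM, List.map_cons]
              rw [min?_cons_cons, if_neg hl]
            · have hyM : ¬ ((yp == (t.map (fun q => q.2)).foldl min xp) = true) := by
                simp only [beq_iff_eq]; rw [he]; exact hxM
              have hxM' : ¬ ((xp == (t.map (fun q => q.2)).foldl min xp) = true) := by
                simp only [beq_iff_eq]; exact hxM
              simp only [List.filter_cons, if_neg hxM', if_neg hyM]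
          · -- strictly more expensive: y never a candidate
            have hle' : (t.map (fun q => q.2)).foldl min xp ≤ xp := foldl_min_le _ _
            have hy : ¬ ((yp == (t.map (fun q => q.2)).foldl min xp) = true) := by
              simp only [beq_iff_eq]; omega
            simp only [List.filter_cons, if_neg hy]

-- ===== VERDICT (by name: the statement is the Claim_ definition above) =====
theorem producto_mas_barato_spec : Claim_equal_producto_mas_barato := by
  intro catalogo _
  unfold Spec_producto_mas_barato producto_mas_barato producto_mas_barato_alt
  cases hit : (PySem.Dict.ofList catalogo).items with
  | nil => simp [PySem.Dict.size, hit]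
  | cons p rest =>
      simp only [PySem.Dict.size, PySem.Dict.values, hit, List.length_cons, List.map_cons]
      have hfold : List.foldl pmbStep none (p :: rest) = List.foldl pmbStep (some p) rest := rfl
      rw [hfold, pmb_fold]
      rw [PySem.List.min?_id_cons]
      cases hmc : PySem.List.min?
          (((p :: rest).filter
              (fun q => q.2 == (rest.map (fun q => q.2)).foldl min p.2)).map (fun q => q.1))
          (fun n => PySem.Str.lower n) with
      | none => simp [hmc]
      | some n => simp [hmc]
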